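-- pv_equiv track=rewrite | github.com/jadetang/leetcode-in-python3 | 1625.py | transform
-- ===== SOURCE A (Python) =====
-- def transform(s: str, delta: int):
--     ans = ''
--     for i, c in enumerate(s):
--         if i % 2 == 1:
--             ans += str((int(c) + delta) % 10)
--         else:
--             ans += c
--     return ans
-- ===== SOURCE B (Python) =====
-- def transform(s: str, delta: int):
--     out = []
--     i = 0
--     n = len(s)
--     while i + 1 < n:
--         out.append(s[i])
--         out.append(str((int(s[i + 1]) + delta) % 10))
--         i += 2
--     if i < n:
--         out.append(s[i])
--     return ''.join(out)
-- ===== Notes on version B (the rewrite author's own statement) =====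
-- stated objective: alternative
-- what changed: Replaces A's enumerate loop with a per-index parity branch and string += by a two-at-a-time pair loop (even char kept, odd digit shifted each step, leftover even char appended) collected in a list and joined once.
import Mathlib
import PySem

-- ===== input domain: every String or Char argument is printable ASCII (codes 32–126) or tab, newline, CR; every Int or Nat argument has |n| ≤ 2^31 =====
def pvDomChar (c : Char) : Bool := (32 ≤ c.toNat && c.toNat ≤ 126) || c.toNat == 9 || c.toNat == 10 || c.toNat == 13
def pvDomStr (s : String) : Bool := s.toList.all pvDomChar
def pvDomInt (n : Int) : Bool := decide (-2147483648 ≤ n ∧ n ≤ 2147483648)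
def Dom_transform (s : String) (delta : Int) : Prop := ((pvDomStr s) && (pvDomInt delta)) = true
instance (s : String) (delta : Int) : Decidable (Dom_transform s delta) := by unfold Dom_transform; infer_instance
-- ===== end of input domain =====

-- B replaces A's parity-branched enumerate loop (string +=) by a two-at-a-time pair loop with a final join; objective: alternative.

-- ===== PORT A =====
-- str((int(c) + delta) % 10), the per-character shift both Pythons perform verbatim
-- (int(c) is PySem.Int.ofChars? [c]; Pre_ guarantees it is some, so .getD 0 is never taken on admitted inputs)
def shiftChar (delta : Int) (c : Char) : List Char :=
  (PySem.Int.toStr (PySem.Int.mod ((PySem.Int.ofChars? [c]).getD 0 + delta) 10)).toList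

-- literal port of A: fold over enumerate(s), branching on i % 2
def transform (s : String) (delta : Int) : String :=
  String.mk ((PySem.List.enumerate s.toList 0).foldl
    (fun ans ic => if PySem.Int.mod ic.1 2 == 1 then ans ++ shiftChar delta ic.2 else ans ++ [ic.2]) [])

-- ===== PORT B =====
-- the while-loop of Source B: two characters per step, leftover even char kept, then join
def altLoop (delta : Int) : List Char → List Char
  | [] => []
  | [a] => [a]
  | a :: b :: rest => a :: (shiftChar delta b ++ altLoop delta rest)

def transform_alt (s : String) (delta : Int) : String :=
  String.mk (altLoop delta s.toList)

-- ===== PRECONDITION & SPEC =====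
-- A raises ValueError when some odd-index character is not int()-parsable; those inputs are excluded (B raises there too).
def Pre_transform (s : String) (delta : Int) : Prop :=
  ∀ i : Nat, i < s.toList.length → i % 2 = 1 →
    (PySem.Int.ofChars? [s.toList.getD i ' ']).isSome = true
instance (s : String) (delta : Int) : Decidable (Pre_transform s delta) := by
  unfold Pre_transform; infer_instance

def pvWitness_transform : String × Int := ("a1b2", 3)

def Spec_transform (s : String) (delta : Int) (out : String) : Prop := out = transform_alt s delta
instance (s : String) (delta : Int) (out : String) : Decidable (Spec_transform s delta out) := by unfold Spec_transform; infer_instance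

-- ===== CLAIM (what is proved, stated in full; the proofs are below) =====
def Claim_equal_transform : Prop := ∀ (s : String) (delta : Int), Dom_transform s delta → Pre_transform s delta → Spec_transform s delta (transform s delta)

-- ===== LEMMAS AND PROOFS =====

-- parity of Python's mod by 2
theorem pyMod_two_even (n : Int) (h : n % 2 = 0) : (PySem.Int.mod n 2 == 1) = false := by
  simp only [PySem.Int.mod, Int.fmod_eq_emod, beq_eq_false_iff_ne, ne_eq]
  omega

theorem pyMod_two_odd (n : Int) (h : n % 2 = 0) : (PySem.Int.mod (n + 1) 2 == 1) = true := by
  simp only [PySem.Int.mod, Int.fmod_eq_emod, beq_iff_eq]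
  omega

-- the fold over enumerate starting at an even index equals the pair loop, prepended to the accumulator
theorem foldA_eq_altLoop (delta : Int) (l : List Char) :
    ∀ (n : Int) (acc : List Char), n % 2 = 0 →
    (PySem.List.enumerate l n).foldl
      (fun ans ic => if PySem.Int.mod ic.1 2 == 1 then ans ++ shiftChar delta ic.2 else ans ++ [ic.2]) acc
    = acc ++ altLoop delta l := by
  induction l using altLoop.induct with
  | case1 => intro n acc _; simp [PySem.List.enumerate_nil, altLoop]
  | case2 a =>
      intro n acc hn
      simp only [PySem.List.enumerate_cons, PySem.List.enumerate_nil, List.foldl_cons,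
        List.foldl_nil, pyMod_two_even n hn, altLoop]
      simp
  | case3 a b rest ih =>
      intro n acc hn
      have h2 : (n + 2) % 2 = 0 := by omega
      simp only [PySem.List.enumerate_cons, List.foldl_cons, pyMod_two_even n hn,
        pyMod_two_odd n hn, if_true]
      rw [show n + 1 + 1 = n + 2 by ring, ih (n + 2) _ h2]
      simp [altLoop]

-- ===== VERDICT (by name: the statement is the Claim_ definition above) =====
theorem transform_spec : Claim_equal_transform := by
  intro s delta _ _
  unfold Spec_transform transform transform_alt
  rw [foldA_eq_altLoop delta s.toList 0 [] (by decide)]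
  simp
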